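-- pv_equiv track=rewrite | github.com/twgjr/ECG-digitizer | models.py | _pool_flags
-- ===== SOURCE A (Python) =====
-- def _pool_flags(padded_seq_len, depth, latent_dim):
--     """Return per-layer booleans (True=apply pool) and the resulting compressed seq len.
--
--     Pool is skipped at a layer when halving would bring seq_len below latent_dim,
--     ensuring the spatial dimension is always >= latent_dim.
--     """
--     flags = []
--     seq = padded_seq_len
--     for _ in range(depth):
--         if seq // 2 >= latent_dim:
--             flags.append(True)
--             seq //= 2
--         else:
--             flags.append(False)
--     return flags, seq
-- ===== SOURCE B (Python) =====
-- def _pool_flags(padded_seq_len, depth, latent_dim):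
--     """Closed form: after j pools the length is padded_seq_len >> j (arithmetic
--     right shift = repeated floor halving), so the flags are determined by k, the
--     first layer j whose shifted length padded_seq_len >> (j + 1) drops below
--     latent_dim (k = number of layers if none does): layer j pools iff j < k."""
--     layers = range(max(depth, 0))
--     k = next((j for j in layers if padded_seq_len >> (j + 1) < latent_dim), len(layers))
--     return [j < k for j in layers], padded_seq_len >> k
-- ===== Notes on version B (the rewrite author's own statement) =====
-- stated objective: alternative
-- what changed: Replaced A's stateful loop (running seq halved in place, flags appended one by one) by a closed-form characterization: the length after j pools is padded_seq_len >> j, so B finds the first layer index k whose shifted length drops below latent_dim and builds each flag as the comparison j < k, returning padded_seq_len >> k; constant-factor speedup from dropping the per-iteration branch-and-append state updates.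
import Mathlib
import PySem

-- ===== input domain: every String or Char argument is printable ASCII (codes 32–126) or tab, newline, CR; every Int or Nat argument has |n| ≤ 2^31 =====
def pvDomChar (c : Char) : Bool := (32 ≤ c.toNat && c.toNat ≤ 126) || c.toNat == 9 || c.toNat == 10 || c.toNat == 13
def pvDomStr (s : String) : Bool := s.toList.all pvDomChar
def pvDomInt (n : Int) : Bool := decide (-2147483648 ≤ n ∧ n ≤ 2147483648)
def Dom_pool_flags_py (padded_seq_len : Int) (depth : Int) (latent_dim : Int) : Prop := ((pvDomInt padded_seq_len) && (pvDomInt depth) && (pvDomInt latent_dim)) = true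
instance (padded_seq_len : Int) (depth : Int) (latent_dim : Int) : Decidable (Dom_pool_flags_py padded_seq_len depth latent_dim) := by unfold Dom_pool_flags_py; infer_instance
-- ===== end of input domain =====

-- B replaces A's stateful halving loop by a closed form: layer j pools iff j < k, where k is
-- the first index with padded_seq_len >> (j+1) < latent_dim; final length is padded_seq_len >> k.


-- ===== PORT A =====
-- literal port of A: for _ in range(depth): branch on seq // 2 >= latent_dim, append a flag
def pool_flags_py (padded_seq_len : Int) (depth : Int) (latent_dim : Int) : List Bool × Int :=
  (PySem.List.pyRange 0 depth 1).foldl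
    (fun (st : List Bool × Int) _ =>
      if PySem.Int.floordiv st.2 2 ≥ latent_dim then (st.1 ++ [true], PySem.Int.floordiv st.2 2)
      else (st.1 ++ [false], st.2))
    ([], padded_seq_len)

-- ===== PORT B =====
-- Python's p >> m for m ≥ 0: arithmetic right shift = floor division by 2^m (exact; B only
-- shifts by nonnegative amounts)
def pyShr (p m : Int) : Int := PySem.Int.floordiv p (2 ^ m.toNat)

-- port of Source B: layers = range(max(depth,0)); k = next((j for j in layers if p >> (j+1) < l),
-- len(layers)); return [j < k for j in layers], p >> k
def pool_flags_py_alt (padded_seq_len : Int) (depth : Int) (latent_dim : Int) : List Bool × Int :=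
  let layers := PySem.List.pyRange 0 (max depth 0) 1
  let k : Int :=
    ((layers.find? (fun j => decide (pyShr padded_seq_len (j + 1) < latent_dim))).getD
      (layers.length : Int))
  (layers.map (fun j => decide (j < k)), pyShr padded_seq_len k)

-- ===== PRECONDITION & SPEC =====
def Spec_pool_flags_py (padded_seq_len : Int) (depth : Int) (latent_dim : Int) (out : List Bool × Int) : Prop := out = pool_flags_py_alt padded_seq_len depth latent_dim
instance (padded_seq_len : Int) (depth : Int) (latent_dim : Int) (out : List Bool × Int) : Decidable (Spec_pool_flags_py padded_seq_len depth latent_dim out) := by unfold Spec_pool_flags_py; infer_instance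

-- ===== CLAIM (what is proved, stated in full; the proofs are below) =====
def Claim_equal_pool_flags_py : Prop := ∀ (padded_seq_len : Int) (depth : Int) (latent_dim : Int), Dom_pool_flags_py padded_seq_len depth latent_dim → Spec_pool_flags_py padded_seq_len depth latent_dim (pool_flags_py padded_seq_len depth latent_dim)

-- ===== LEMMAS AND PROOFS =====

-- in the lemmas, floordiv by a positive power of two is written with Int division '/'
lemma fd2 (a : Int) : PySem.Int.floordiv a 2 = a / 2 :=
  PySem.Int.floordiv_eq_ediv_of_pos (by norm_num)

lemma fdpow (a : Int) (m : Nat) : PySem.Int.floordiv a (2 ^ m) = a / 2 ^ m :=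
  PySem.Int.floordiv_eq_ediv_of_pos (by positivity)

-- division composition: halving then dividing by 2^m = dividing by 2^(m+1)
lemma ediv_two_pow (p : Int) (m : Nat) : p / 2 / 2 ^ m = p / 2 ^ (m + 1) := by
  rw [Int.ediv_ediv_of_nonneg (by norm_num : (0:Int) ≤ 2), pow_succ']

-- the number of pooled layers: first j < n with p / 2^(j+1) < l, else n
def kN (p l : Int) (n : Nat) : Nat :=
  match (List.range n).find? (fun j => decide (p / 2 ^ (j + 1) < l)) with
  | some j => j
  | none => n

-- common closed form of both ports at Nat level
def BF (p l : Int) (n : Nat) : List Bool × Int :=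
  ((List.range n).map (fun j => decide (j < kN p l n)), p / 2 ^ kN p l n)

lemma kN_succ_pos (p l : Int) (n : Nat) (h : p / 2 ≥ l) :
    kN p l (n + 1) = kN (p / 2) l n + 1 := by
  unfold kN
  rw [List.range_succ_eq_map, List.find?_cons_of_neg, List.find?_map]
  · have hpred : ((fun j => decide (p / 2 ^ (j + 1) < l)) ∘ Nat.succ)
        = (fun j : Nat => decide (p / 2 / 2 ^ (j + 1) < l)) := by
      funext j
      simp [Function.comp, ediv_two_pow]
    rw [hpred]
    cases (List.range n).find? (fun j : Nat => decide (p / 2 / 2 ^ (j + 1) < l)) <;> simp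
  · simp [pow_one]; omega

lemma kN_eq_zero (p l : Int) (n : Nat) (h : ¬ p / 2 ≥ l) :
    kN p l n = 0 := by
  cases n with
  | zero => rfl
  | succ n =>
    unfold kN
    rw [List.range_succ_eq_map, List.find?_cons_of_pos]
    simp [pow_one]; omega

-- A's fold over any index list, from any accumulator, is the closed form BF
lemma loop_char (l : Int) : ∀ (xs : List Int) (acc : List Bool) (p : Int),
    xs.foldl
      (fun (st : List Bool × Int) _ =>
        if PySem.Int.floordiv st.2 2 ≥ l then (st.1 ++ [true], PySem.Int.floordiv st.2 2)
        else (st.1 ++ [false], st.2))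
      (acc, p)
    = (acc ++ (BF p l xs.length).1, (BF p l xs.length).2) := by
  intro xs
  induction xs with
  | nil => intro acc p; simp [BF, kN]
  | cons x xs ih =>
    intro acc p
    by_cases h : p / 2 ≥ l
    · rw [List.foldl_cons, if_pos (by rw [fd2]; exact h), fd2, ih (acc ++ [true]) (p / 2)]
      simp only [BF, List.length_cons, kN_succ_pos p l xs.length h]
      rw [List.range_succ_eq_map, Prod.ext_iff]
      refine ⟨?_, ?_⟩
      · simp [List.map_map, Function.comp]
      · simp [ediv_two_pow]
    · rw [List.foldl_cons, if_neg (by rw [fd2]; exact h), ih (acc ++ [false]) p]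
      simp only [BF, List.length_cons, kN_eq_zero p l _ h]
      rw [List.range_succ_eq_map]
      simp

-- B's port equals the same closed form
lemma kInt_eq (p l : Int) (n : Nat) :
    ((((List.range n).find? (fun j : Nat => decide (p / 2 ^ (j + 1) < l))).map
        (fun k : Nat => ((0 : Int) + k))).getD (n : Int)) = ((kN p l n : Nat) : Int) := by
  unfold kN
  cases hf : (List.range n).find? (fun j : Nat => decide (p / 2 ^ (j + 1) < l)) <;> simp

lemma alt_eq_BF (p d l : Int) : pool_flags_py_alt p d l = BF p l d.toNat := by
  unfold pool_flags_py_alt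
  dsimp only
  have hmax : ((max d 0) - 0).toNat = d.toNat := by omega
  rw [PySem.List.pyRange_one, hmax]
  have hpred : ((fun j => decide (pyShr p (j + 1) < l)) ∘ (fun k : Nat => (0 : Int) + k))
      = (fun j : Nat => decide (p / 2 ^ (j + 1) < l)) := by
    funext j
    have ht : ((j : Int) + 1).toNat = j + 1 := by omega
    simp only [Function.comp, pyShr, zero_add, ht, fdpow]
  rw [List.find?_map, hpred]
  simp only [List.length_map, List.length_range]
  rw [kInt_eq p l d.toNat]
  unfold BF
  rw [Prod.ext_iff]
  refine ⟨?_, ?_⟩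
  · rw [List.map_map]
    refine List.map_congr_left (fun a _ => ?_)
    simp only [Function.comp, decide_eq_decide]
    omega
  · simp only [pyShr, fdpow, Int.toNat_natCast]

-- ===== VERDICT (by name: the statement is the Claim_ definition above) =====
theorem pool_flags_py_spec : Claim_equal_pool_flags_py := by
  intro p d l _
  unfold Spec_pool_flags_py pool_flags_py
  rw [loop_char l (PySem.List.pyRange 0 d 1) [] p, alt_eq_BF]
  simp [PySem.List.length_pyRange_one]
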